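-- pv_equiv track=rewrite | github.com/maastrichtlawtech/rechtspraak-segmentation | data_processing/section_extraction.py | organize_by_number
-- ===== SOURCE A (Python) =====
-- from collections import defaultdict
--
-- def organize_by_number(strings: list[str]) -> dict[int, str]:
--     """
--     Organizes a list of strings based on their leading number and concatenates them.
--     :param strings: A list of strings to organize by the number before the first period.
--     :return: A dictionary where the keys are the leading numbers (as integers),
--               and the values are the concatenated strings associated with that number.
--     """
--     # Initialize a defaultdict to hold the organized strings
--     result = defaultdict(list)
--
--     # Loop through each string and extract the leading number
--     for string in strings:
--         period_index = string.find('.')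
--         if period_index != -1:
--             number = string[:period_index]
--             if number.isdigit():
--                 result[int(number)].append(string)
--
--     # Join the lists into a single string per key
--     for key in result:
--         result[key] = ' '.join(result[key])
--
--     # Sort the dictionary by keys to ensure order
--     sorted_result = dict(sorted(result.items()))
--     return sorted_result
-- ===== SOURCE B (Python) =====
-- from itertools import groupby
--
--
-- def _parse(s):
--     i = s.find('.')
--     if i != -1:
--         head = s[:i]
--         if head.isdigit():
--             return (int(head), s)
--     return None
--
--
-- def organize_by_number(strings):
--     pairs = [p for p in map(_parse, strings) if p is not None]
--     pairs.sort(key=lambda p: p[0])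
--     return {k: ' '.join(s for _, s in g)
--             for k, g in groupby(pairs, key=lambda p: p[0])}
-- ===== Notes on version B (the rewrite author's own statement) =====
-- stated objective: alternative
-- what changed: B parses (key, string) pairs in one filtering pass, stable-sorts the pairs by key, and gathers each key's run with itertools.groupby, instead of A's defaultdict hash-grouping followed by a final sort of the dict items.
import Mathlib
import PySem

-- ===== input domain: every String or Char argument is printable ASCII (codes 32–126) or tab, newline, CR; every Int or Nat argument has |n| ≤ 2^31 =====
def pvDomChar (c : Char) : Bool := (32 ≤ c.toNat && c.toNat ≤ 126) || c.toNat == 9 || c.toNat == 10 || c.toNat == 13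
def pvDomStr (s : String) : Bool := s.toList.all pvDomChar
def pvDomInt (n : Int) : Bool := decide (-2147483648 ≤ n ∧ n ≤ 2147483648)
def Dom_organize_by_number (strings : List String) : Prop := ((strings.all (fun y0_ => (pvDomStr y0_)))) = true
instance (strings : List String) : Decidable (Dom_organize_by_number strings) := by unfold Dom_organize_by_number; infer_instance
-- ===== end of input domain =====

-- B parses (key, string) pairs in one pass, stable-sorts them by key, and gathers each
-- consecutive run with a groupby pass (alternative decomposition; same asymptotic cost as A).



-- ===== PORT A =====
-- Transliteration of A: defaultdict(list) grouping keyed by the leading number,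
-- then ' '.join per key, then sorted(result.items()) (tuple order; = PySem.List.sorted2).
-- (int(number) never raises when number.isdigit(); the `none` arm of ofStr? is unreachable and leaves d unchanged.)
def organize_by_number (strings : List String) : List (Int × String) :=
  let result := strings.foldl (fun d s =>
      let period_index := PySem.Str.find s "."
      if period_index ≠ -1 then
        let number := PySem.Str.slice s none (some period_index)
        if PySem.Str.strIsdigit number then
          match PySem.Int.ofStr? number with
          | some n => d.modify n [] (fun v => v ++ [s])
          | none => d
        else d
      else d)
    (PySem.Dict.empty : PySem.Dict Int (List String))
  let joined := result.items.map (fun p => (p.1, PySem.Str.join " " p.2))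
  PySem.List.sorted2 joined (fun p => p.1) (fun p => p.2) false

-- ===== PORT B =====
-- _parse: the same find('.')/isdigit()/int filter, returning Option (key, string).
def pvParse (s : String) : Option (Int × String) :=
  let i := PySem.Str.find s "."
  if i ≠ -1 then
    let head := PySem.Str.slice s none (some i)
    if PySem.Str.strIsdigit head then
      (PySem.Int.ofStr? head).map (fun n => (n, s))
    else none
  else none

-- itertools.groupby over the key-sorted pairs: gather each consecutive run of one key,
-- join its strings with ' '.
def pvGroupJoin : List (Int × String) → List (Int × String)
  | [] => []
  | p :: rest =>
    (p.1, PySem.Str.join " " (p.2 :: (rest.takeWhile (fun q => q.1 == p.1)).map (fun q => q.2)))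
      :: pvGroupJoin (rest.dropWhile (fun q => q.1 == p.1))
termination_by l => l.length
decreasing_by
  simpa using Nat.lt_succ_of_le (List.length_dropWhile_le _ _)

def organize_by_number_alt (strings : List String) : List (Int × String) :=
  let pairs := strings.filterMap pvParse
  pvGroupJoin (PySem.List.sorted pairs (fun p => p.1) false)

-- ===== PRECONDITION & SPEC =====
def Spec_organize_by_number (strings : List String) (out : List (Int × String)) : Prop := out = organize_by_number_alt strings
instance (strings : List String) (out : List (Int × String)) : Decidable (Spec_organize_by_number strings out) := by unfold Spec_organize_by_number; infer_instance

-- ===== CLAIM (what is proved, stated in full; the proofs are below) =====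
def Claim_equal_organize_by_number : Prop := ∀ (strings : List String), Dom_organize_by_number strings → Spec_organize_by_number strings (organize_by_number strings)

-- ===== LEMMAS AND PROOFS =====

-- Step 1a: A's loop body, phrased through pvParse (the same tests, verbatim)
theorem pv_step (d : PySem.Dict Int (List String)) (s : String) :
    (let period_index := PySem.Str.find s "."
      if period_index ≠ -1 then
        let number := PySem.Str.slice s none (some period_index)
        if PySem.Str.strIsdigit number then
          match PySem.Int.ofStr? number with
          | some n => d.modify n [] (fun v => v ++ [s])
          | none => d
        else d
      else d)
    = (match pvParse s with
       | some p => d.modify p.1 [] (fun v => v ++ [p.2])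
       | none => d) := by
  simp only [pvParse]
  split_ifs with h1 h2
  · cases h : PySem.Int.ofStr? (PySem.Str.slice s none (some (PySem.Str.find s "."))) with
    | some n => simp only [Option.map_some]
    | none => simp only [Option.map_none]
  · rfl
  · rfl

-- Step 1b: A's grouping fold over strings = fold of the parsed pairs
theorem pv_foldA_eq (strings : List String) : ∀ (d : PySem.Dict Int (List String)),
    strings.foldl (fun d s =>
      let period_index := PySem.Str.find s "."
      if period_index ≠ -1 then
        let number := PySem.Str.slice s none (some period_index)
        if PySem.Str.strIsdigit number then
          match PySem.Int.ofStr? number with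
          | some n => d.modify n [] (fun v => v ++ [s])
          | none => d
        else d
      else d) d
    = (strings.filterMap pvParse).foldl (fun d p => d.modify p.1 [] (fun v => v ++ [p.2])) d := by
  induction strings with
  | nil => intro d; rfl
  | cons s t ih =>
    intro d
    rw [List.foldl_cons, List.filterMap_cons, pv_step]
    cases hp : pvParse s with
    | none => exact ih d
    | some p => rw [List.foldl_cons]; exact ih _

-- Step 2: with pairwise-distinct first components, Python's tuple sort is the key-sort
theorem pv_insertBy_congr {α : Type} (bef bef' : α → α → Bool) (x : α) (ys : List α)
    (h : ∀ y ∈ ys, bef x y = bef' x y) :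
    PySem.List.insertBy bef x ys = PySem.List.insertBy bef' x ys := by
  induction ys with
  | nil => rfl
  | cons y ys ih =>
    simp only [PySem.List.insertBy]
    rw [h y (by simp)]
    split_ifs with hb
    · rfl
    · rw [ih (fun z hz => h z (by simp [hz]))]

theorem pv_foldl_insertBy_congr {α : Type} (bef bef' : α → α → Bool) (l : List α)
    (H : ∀ a b : α, a ∈ l → b ∈ l → bef a b = bef' a b) :
    ∀ (xs acc : List α), (∀ x ∈ xs, x ∈ l) → (∀ x ∈ acc, x ∈ l) →
    xs.foldl (fun acc x => PySem.List.insertBy bef x acc) acc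
      = xs.foldl (fun acc x => PySem.List.insertBy bef' x acc) acc := by
  intro xs
  induction xs with
  | nil => intro acc _ _; rfl
  | cons x xs ih =>
    intro acc hxs hacc
    simp only [List.foldl_cons]
    rw [pv_insertBy_congr bef bef' x acc
        (fun y hy => H x y (hxs x (by simp)) (hacc y hy))]
    exact ih _ (fun z hz => hxs z (by simp [hz]))
      (fun z hz => ((PySem.List.mem_insertBy _ _ _ _).mp hz).elim
        (fun h => h ▸ hxs x (by simp)) (fun h => hacc z h))

theorem pv_sorted2_eq_sorted (L : List (Int × String)) (hnd : (L.map (fun p => p.1)).Nodup) :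
    PySem.List.sorted2 L (fun p => p.1) (fun p => p.2) false
      = PySem.List.sorted L (fun p => p.1) false := by
  have hinj := List.inj_on_of_nodup_map hnd
  simp only [PySem.List.sorted2, PySem.List.sorted, if_neg (by decide : ¬(false = true))]
  apply pv_foldl_insertBy_congr _ _ L _ L [] (fun x hx => hx) (by simp)
  intro a b ha hb
  rcases lt_trichotomy a.1 b.1 with h | h | h
  · simp [h]
  · have : a = b := hinj ha hb h
    subst this
    simp
  · simp [h, not_lt.mpr (le_of_lt h)]

-- Step 3: stability of the key-sort — filtering one key out of the sorted list
-- gives that key's pairs in original order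
theorem pv_pairwise_insertBy (x : Int × String) (ys : List (Int × String))
    (h : ys.Pairwise (fun a b => a.1 ≤ b.1)) :
    (PySem.List.insertBy (fun a b => decide (a.1 < b.1)) x ys).Pairwise (fun a b => a.1 ≤ b.1) := by
  induction ys with
  | nil => simp [PySem.List.insertBy]
  | cons y ys ih =>
    rcases List.pairwise_cons.mp h with ⟨hy, hys⟩
    simp only [PySem.List.insertBy]
    split_ifs with hb
    · refine List.pairwise_cons.mpr ⟨?_, h⟩
      intro z hz
      rcases List.mem_cons.mp hz with hz | hz
      · exact hz ▸ le_of_lt (by simpa using hb)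
      · exact le_trans (le_of_lt (by simpa using hb)) (hy z hz)
    · refine List.pairwise_cons.mpr ⟨?_, ih hys⟩
      intro z hz
      rcases (PySem.List.mem_insertBy _ _ _ _).mp hz with hz | hz
      · exact hz ▸ not_lt.mp (by simpa using hb)
      · exact hy z hz

theorem pv_filter_insertBy (x : Int × String) (k : Int) (ys : List (Int × String))
    (h : ys.Pairwise (fun a b => a.1 ≤ b.1)) :
    (PySem.List.insertBy (fun a b => decide (a.1 < b.1)) x ys).filter (fun p => p.1 == k)
      = if x.1 == k then ys.filter (fun p => p.1 == k) ++ [x]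
        else ys.filter (fun p => p.1 == k) := by
  induction ys with
  | nil =>
    by_cases hk : x.1 = k <;> simp [PySem.List.insertBy, hk]
  | cons y ys ih =>
    rcases List.pairwise_cons.mp h with ⟨hy, hys⟩
    simp only [PySem.List.insertBy]
    by_cases hlt : x.1 < y.1
    · rw [if_pos (show (decide (x.1 < y.1)) = true by simpa using hlt)]
      by_cases hk : x.1 = k
      · have hfn : (y :: ys).filter (fun p => p.1 == k) = [] := by
          apply List.filter_eq_nil_iff.mpr
          intro z hz
          rcases List.mem_cons.mp hz with hz' | hz'
          · subst hz'; simp only [beq_iff_eq]; omega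
          · have := hy z hz'; simp only [beq_iff_eq]; omega
        rw [List.filter_cons, hfn]
        simp [hk]
      · rw [List.filter_cons]
        simp [hk]
    · rw [if_neg (show ¬(decide (x.1 < y.1)) = true by simpa using hlt)]
      rw [List.filter_cons, ih hys, List.filter_cons]
      by_cases hyk : y.1 = k <;> by_cases hxk : x.1 = k <;> simp [hyk, hxk]

theorem pv_foldl_filter (k : Int) :
    ∀ (ps acc : List (Int × String)), acc.Pairwise (fun a b => a.1 ≤ b.1) →
    (ps.foldl (fun acc x => PySem.List.insertBy (fun a b => decide (a.1 < b.1)) x acc) acc).filter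
        (fun p => p.1 == k)
      = acc.filter (fun p => p.1 == k) ++ ps.filter (fun p => p.1 == k) := by
  intro ps
  induction ps with
  | nil => intro acc _; simp
  | cons p ps ih =>
    intro acc hacc
    rw [List.foldl_cons, ih _ (pv_pairwise_insertBy p acc hacc),
        pv_filter_insertBy p k acc hacc, List.filter_cons]
    by_cases hk : p.1 = k <;> simp [hk]

theorem pv_sorted_filter (ps : List (Int × String)) (k : Int) :
    (PySem.List.sorted ps (fun p => p.1) false).filter (fun p => p.1 == k)
      = ps.filter (fun p => p.1 == k) := by
  simp only [PySem.List.sorted, if_neg (by decide : ¬(false = true))]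
  simpa using pv_foldl_filter k ps [] (by simp)

-- Step 4: what pvGroupJoin produces on a key-sorted list
theorem pv_dropWhile_keys (p1 : Int) (rest : List (Int × String))
    (hle : ∀ q ∈ rest, p1 ≤ q.1) (hp : rest.Pairwise (fun a b => a.1 ≤ b.1)) :
    ∀ q ∈ rest.dropWhile (fun q => q.1 == p1), p1 < q.1 := by
  intro q hq
  cases hd : rest.dropWhile (fun q => q.1 == p1) with
  | nil => rw [hd] at hq; simp at hq
  | cons h t =>
    have hhead := List.head?_dropWhile_not (fun q => q.1 == p1) rest
    rw [hd] at hhead hq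
    simp only [List.head?_cons] at hhead
    have hmem : ∀ z ∈ h :: t, z ∈ rest := by
      intro z hz
      exact (hd ▸ List.dropWhile_sublist (l := rest) (fun q => q.1 == p1)).mem hz
    have hph : p1 < h.1 := by
      have h1 := hle h (hmem h (by simp))
      have h2 : ¬ (h.1 = p1) := by simpa using hhead
      omega
    rcases List.mem_cons.mp hq with hq' | hq'
    · exact hq' ▸ hph
    · have hpd : (h :: t).Pairwise (fun a b => a.1 ≤ b.1) :=
        List.Pairwise.sublist (hd ▸ List.dropWhile_sublist (l := rest) (fun q => q.1 == p1)) hp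
      have := (List.pairwise_cons.mp hpd).1 q hq'
      omega

theorem pv_filter_head (p : Int × String) (rest : List (Int × String))
    (hle : ∀ q ∈ rest, p.1 ≤ q.1) (hp : rest.Pairwise (fun a b => a.1 ≤ b.1)) :
    (p :: rest).filter (fun q => q.1 == p.1)
      = p :: rest.takeWhile (fun q => q.1 == p.1) := by
  rw [List.filter_cons, if_pos (by simp : (p.1 == p.1) = true)]
  congr 1
  conv_lhs => rw [← List.takeWhile_append_dropWhile (p := fun q => q.1 == p.1) (l := rest)]
  rw [List.filter_append]
  have h1 : (rest.takeWhile (fun q => q.1 == p.1)).filter (fun q => q.1 == p.1)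
      = rest.takeWhile (fun q => q.1 == p.1) :=
    List.filter_eq_self.mpr (fun a ha => List.mem_takeWhile_imp (p := fun q : Int × String => q.1 == p.1) ha)
  have h2 : (rest.dropWhile (fun q => q.1 == p.1)).filter (fun q => q.1 == p.1) = [] := by
    apply List.filter_eq_nil_iff.mpr
    intro z hz
    have := pv_dropWhile_keys p.1 rest hle hp z hz
    simp only [beq_iff_eq]
    omega
  rw [h1, h2, List.append_nil]

theorem pv_filter_ne (p : Int × String) (rest : List (Int × String)) (k : Int) (hk : k ≠ p.1) :
    (p :: rest).filter (fun q => q.1 == k)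
      = (rest.dropWhile (fun q => q.1 == p.1)).filter (fun q => q.1 == k) := by
  rw [List.filter_cons, if_neg (by simpa using fun h => hk h.symm)]
  conv_lhs => rw [← List.takeWhile_append_dropWhile (p := fun q => q.1 == p.1) (l := rest)]
  rw [List.filter_append]
  have h1 : (rest.takeWhile (fun q => q.1 == p.1)).filter (fun q => q.1 == k) = [] := by
    apply List.filter_eq_nil_iff.mpr
    intro z hz
    have := List.mem_takeWhile_imp hz
    simp only [beq_iff_eq] at this ⊢
    omega
  rw [h1, List.nil_append]

theorem pv_memG : ∀ (n : Nat) (sp : List (Int × String)), sp.length ≤ n →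
    sp.Pairwise (fun a b => a.1 ≤ b.1) →
    ∀ x : Int × String, (x ∈ pvGroupJoin sp ↔
      x.1 ∈ sp.map (fun p => p.1) ∧
      x.2 = PySem.Str.join " " ((sp.filter (fun p => p.1 == x.1)).map (fun p => p.2))) := by
  intro n
  induction n with
  | zero =>
    intro sp hlen _ x
    rw [List.length_eq_zero_iff.mp (Nat.le_zero.mp hlen)]
    simp [pvGroupJoin]
  | succ n ih =>
    intro sp hlen hp x
    cases sp with
    | nil => simp [pvGroupJoin]
    | cons p rest =>
      rcases List.pairwise_cons.mp hp with ⟨hle', hrest⟩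
      have hle : ∀ q ∈ rest, p.1 ≤ q.1 := hle'
      have hdlen : (rest.dropWhile (fun q => q.1 == p.1)).length ≤ n := by
        have := List.length_dropWhile_le (fun q : Int × String => q.1 == p.1) rest
        simp only [List.length_cons] at hlen
        omega
      have hdp : (rest.dropWhile (fun q => q.1 == p.1)).Pairwise (fun a b => a.1 ≤ b.1) :=
        List.Pairwise.sublist (List.dropWhile_sublist _) hrest
      have hdk := pv_dropWhile_keys p.1 rest hle hrest
      rw [pvGroupJoin]
      simp only [List.mem_cons]
      constructor
      · rintro (hx | hx)
        · subst hx
          refine ⟨by simp, ?_⟩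
          rw [pv_filter_head p rest hle hrest]
          simp
        · rcases (ih _ hdlen hdp x).mp hx with ⟨hk, hv⟩
          have hkr : x.1 ∈ rest.map (fun p => p.1) := by
            rcases List.mem_map.mp hk with ⟨q, hq, hqe⟩
            exact List.mem_map.mpr ⟨q, (List.dropWhile_sublist _).mem hq, hqe⟩
          have hkne : x.1 ≠ p.1 := by
            rcases List.mem_map.mp hk with ⟨q, hq, hqe⟩
            have := hdk q hq
            omega
          refine ⟨by simp [hkr], ?_⟩
          rw [pv_filter_ne p rest x.1 hkne]
          exact hv
      · rintro ⟨hk, hv⟩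
        by_cases hkp : x.1 = p.1
        · left
          rw [hkp] at hv
          rw [pv_filter_head p rest hle hrest] at hv
          rw [Prod.ext_iff]
          exact ⟨hkp, by simpa using hv⟩
        · right
          rw [List.map_cons, List.mem_cons] at hk
          rcases hk with hk | hk
          · omega
          · rcases List.mem_map.mp hk with ⟨q, hq, hqe⟩
            -- x.1 occurs in rest with key ≠ p.1, hence past the takeWhile prefix
            have hqd : q ∈ rest.dropWhile (fun q => q.1 == p.1) := by
              have : q ∈ rest.takeWhile (fun q => q.1 == p.1) ∨
                  q ∈ rest.dropWhile (fun q => q.1 == p.1) := by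
                rw [← List.mem_append, List.takeWhile_append_dropWhile]
                exact hq
              rcases this with h | h
              · exact absurd (by simpa using List.mem_takeWhile_imp h) (by omega)
              · exact h
            apply (ih _ hdlen hdp x).mpr
            refine ⟨List.mem_map.mpr ⟨q, hqd, hqe⟩, ?_⟩
            rw [pv_filter_ne p rest x.1 hkp] at hv
            exact hv

theorem pv_pwG : ∀ (n : Nat) (sp : List (Int × String)), sp.length ≤ n →
    sp.Pairwise (fun a b => a.1 ≤ b.1) →
    (pvGroupJoin sp).Pairwise (fun a b => a.1 < b.1) := by
  intro n
  induction n with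
  | zero =>
    intro sp hlen _
    rw [List.length_eq_zero_iff.mp (Nat.le_zero.mp hlen)]
    simp [pvGroupJoin]
  | succ n ih =>
    intro sp hlen hp
    cases sp with
    | nil => simp [pvGroupJoin]
    | cons p rest =>
      rcases List.pairwise_cons.mp hp with ⟨hle', hrest⟩
      have hle : ∀ q ∈ rest, p.1 ≤ q.1 := hle'
      have hdlen : (rest.dropWhile (fun q => q.1 == p.1)).length ≤ n := by
        have := List.length_dropWhile_le (fun q : Int × String => q.1 == p.1) rest
        simp only [List.length_cons] at hlen
        omega
      have hdp : (rest.dropWhile (fun q => q.1 == p.1)).Pairwise (fun a b => a.1 ≤ b.1) :=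
        List.Pairwise.sublist (List.dropWhile_sublist _) hrest
      have hdk := pv_dropWhile_keys p.1 rest hle hrest
      rw [pvGroupJoin]
      refine List.pairwise_cons.mpr ⟨?_, ih _ hdlen hdp⟩
      intro x hx
      rcases (pv_memG n _ hdlen hdp x).mp hx with ⟨hk, _⟩
      rcases List.mem_map.mp hk with ⟨q, hq, hqe⟩
      have := hdk q hq
      simpa [← hqe] using this

theorem pv_main (strings : List String) :
    organize_by_number strings = organize_by_number_alt strings := by
  unfold organize_by_number organize_by_number_alt
  dsimp only
  rw [pv_foldA_eq]
  set ps := strings.filterMap pvParse with hps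
  set d := ps.foldl (fun d p => d.modify p.1 [] (fun v => v ++ [p.2]))
      (PySem.Dict.empty : PySem.Dict Int (List String)) with hd
  have hkeys : d.keys = PySem.Set.ofList (ps.map (fun p => p.1)) := by
    rw [hd, PySem.Dict.keys_foldl_modify_key ps (fun p => p.1) [] (fun _ p => fun v => v ++ [p.2])]
    simp [PySem.Dict.empty, PySem.Dict.keys, PySem.Set.update_nil_left]
  have hnd : d.keys.Nodup := by
    rw [hd]
    exact PySem.Dict.nodup_keys_foldl_modify_key ps (fun p => p.1) [] (fun _ p => fun v => v ++ [p.2]) _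
      (by simp [PySem.Dict.empty, PySem.Dict.keys])
  have hgetD : ∀ k : Int, d.getD k [] = (ps.filter (fun p => p.1 == k)).map (fun p => p.2) := by
    intro k
    rw [hd, PySem.Dict.getD_foldl_modify_append]
    simp [PySem.Dict.empty, PySem.Dict.getD, PySem.Dict.get?]
  have hL : d.items.map (fun p => (p.1, PySem.Str.join " " p.2))
      = d.keys.map (fun k => (k, PySem.Str.join " "
          ((ps.filter (fun p => p.1 == k)).map (fun p => p.2)))) := by
    rw [PySem.Dict.items_eq_map_keys d hnd [], List.map_map]
    exact List.map_congr_left (fun k _ => by simp [Function.comp, hgetD k])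
  rw [hL]
  set L := d.keys.map (fun k => (k, PySem.Str.join " "
      ((ps.filter (fun p => p.1 == k)).map (fun p => p.2)))) with hLdef
  have hmapfst : L.map (fun p => p.1) = d.keys := by
    rw [hLdef, List.map_map]
    simp [Function.comp_def]
  have hndL : (L.map (fun p => p.1)).Nodup := hmapfst ▸ hnd
  rw [pv_sorted2_eq_sorted L hndL]
  set sp := PySem.List.sorted ps (fun p => p.1) false with hsp
  have hsppw : sp.Pairwise (fun a b => a.1 ≤ b.1) := by
    simpa using PySem.List.sorted_pairwise ps (fun p => p.1)
  have hperm : (sp.map (fun p => p.1)).Perm (ps.map (fun p => p.1)) :=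
    (PySem.List.sorted_perm ps (fun p => p.1) false).map _
  have hmemL : ∀ x : Int × String, x ∈ L ↔
      (x.1 ∈ ps.map (fun p => p.1) ∧
        x.2 = PySem.Str.join " " ((ps.filter (fun p => p.1 == x.1)).map (fun p => p.2))) := by
    intro x
    rw [hLdef, List.mem_map]
    constructor
    · rintro ⟨k, hk, he⟩
      have h1 : x.1 = k := by rw [← he]
      have h2 := (PySem.Set.mem_ofList _ _).mp (hkeys ▸ hk)
      subst h1
      exact ⟨h2, by rw [← he]⟩
    · rintro ⟨hk, hv⟩
      refine ⟨x.1, hkeys ▸ (PySem.Set.mem_ofList _ _).mpr hk, ?_⟩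
      rw [Prod.ext_iff]
      exact ⟨rfl, hv.symm⟩
  have hmemG : ∀ x : Int × String, x ∈ pvGroupJoin sp ↔ x ∈ L := by
    intro x
    rw [pv_memG sp.length sp le_rfl hsppw x, hmemL x]
    constructor
    · rintro ⟨hk, hv⟩
      exact ⟨hperm.mem_iff.mp hk, by rw [← pv_sorted_filter ps x.1]; exact hv⟩
    · rintro ⟨hk, hv⟩
      exact ⟨hperm.mem_iff.mpr hk, by rw [pv_sorted_filter ps x.1]; exact hv⟩
  have hGpw : (pvGroupJoin sp).Pairwise (fun a b => a.1 < b.1) :=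
    pv_pwG sp.length sp le_rfl hsppw
  have hGnd : (pvGroupJoin sp).Nodup :=
    hGpw.imp (fun {a b} h => by intro he; rw [he] at h; exact lt_irrefl _ h)
  have hLnd : L.Nodup := List.Nodup.of_map _ hndL
  have hGperm : (pvGroupJoin sp).Perm L :=
    List.perm_of_nodup_nodup_toFinset_eq hGnd hLnd
      (Finset.ext (fun x => by simp only [List.mem_toFinset]; exact hmemG x))
  exact PySem.List.sorted_eq_of_perm_of_pairwise_lt L (pvGroupJoin sp) (fun p => p.1) hGperm hGpw

-- ===== VERDICT (by name: the statement is the Claim_ definition above) =====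
theorem organize_by_number_spec : Claim_equal_organize_by_number := by
  intro strings _
  unfold Spec_organize_by_number
  exact pv_main strings
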